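-- pv_equiv track=rewrite | github.com/NIkok0/DDFed-main | ddfed_fl/FedAvg/server/secure_packing.py | compute_max_pack_len_by_dlog
-- ===== SOURCE A (Python) =====
-- def compute_max_pack_len_by_dlog(base: int, max_dlog: int) -> int:
--     """Upper bound on pack length to keep packed integer <= max_dlog."""
--     if int(max_dlog) < 1:
--         return 1
--     if int(base) <= 1:
--         return 1
--     val = 1
--     count = 0
--     while val <= int(max_dlog):
--         count += 1
--         if val > int(max_dlog) // int(base):
--             break
--         val *= int(base)
--     return max(1, count)
-- ===== SOURCE B (Python) =====
-- def compute_max_pack_len_by_dlog(base: int, max_dlog: int) -> int: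
--     """Upper bound on pack length to keep packed integer <= max_dlog."""
--     if int(max_dlog) < 1:
--         return 1
--     if int(base) <= 1:
--         return 1
--     b, m = int(base), int(max_dlog)
--     # gallop: find hi with b**hi > m (invariant: b**0 <= m)
--     hi = 1
--     while b ** hi <= m:
--         hi *= 2
--     # binary search the largest e in [0, hi) with b**e <= m
--     lo = 0
--     while hi - lo > 1:
--         mid = (lo + hi) // 2
--         if b ** mid <= m:
--             lo = mid
--         else:
--             hi = mid
--     return lo + 1
-- ===== Notes on version B (the rewrite author's own statement) =====
-- stated objective: alternative
-- what changed: B replaces A's linear multiply-and-count loop by an exponential-gallop plus binary search on the exponent, testing base**e <= max_dlog directly; same two guards.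
import Mathlib
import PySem

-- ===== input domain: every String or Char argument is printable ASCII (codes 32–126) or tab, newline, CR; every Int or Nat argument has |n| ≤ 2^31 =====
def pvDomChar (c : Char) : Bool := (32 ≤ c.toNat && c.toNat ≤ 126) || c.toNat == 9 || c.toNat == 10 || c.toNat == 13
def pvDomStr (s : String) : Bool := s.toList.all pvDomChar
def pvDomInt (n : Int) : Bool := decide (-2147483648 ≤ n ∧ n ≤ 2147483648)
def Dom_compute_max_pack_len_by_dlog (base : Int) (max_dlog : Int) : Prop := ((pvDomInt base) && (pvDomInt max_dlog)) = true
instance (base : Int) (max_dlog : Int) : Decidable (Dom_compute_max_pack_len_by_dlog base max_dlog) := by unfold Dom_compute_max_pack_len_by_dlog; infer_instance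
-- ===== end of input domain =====

-- B finds the answer by exponential-gallop plus binary search on the exponent (testing
-- base**e <= max_dlog) instead of A's linear multiply-and-count loop (objective: alternative).


-- ===== PORT A =====
-- A's while loop: val grows by *base each turn, breaking once val > max_dlog // base.
-- hb/hval carry the facts (base ≥ 2, val ≥ 1) that hold at every call site and make the
-- loop terminate; they do not alter the computation.
def pvLoopA (b M : Int) (hb : 2 ≤ b) (val count : Int) (hval : 1 ≤ val) : Int :=
  if hle : val ≤ M then
    let count' := count + 1
    if val > PySem.Int.floordiv M b then count'
    else pvLoopA b M hb (val * b) count' (by nlinarith)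
  else count
termination_by (M + 1 - val).toNat
decreasing_by
  have h2 : val ≤ PySem.Int.floordiv M b := by omega
  have h3 : val * b ≤ M := by
    have := (PySem.Int.le_floordiv_iff_mul_le (a := M) (b := b) (q := val) (by omega)).mp h2
    omega
  have : val < val * b := by nlinarith
  omega

def compute_max_pack_len_by_dlog (base : Int) (max_dlog : Int) : Int :=
  if max_dlog < 1 then 1
  else if hb : base ≤ 1 then 1
  else max 1 (pvLoopA base max_dlog (by omega) 1 0 (by omega))

-- ===== PORT B =====
-- B's gallop loop: double hi until base ** hi > m.  Python's `b ** hi` with a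
-- nonnegative int exponent is exactly b ^ hi.toNat (hi ≥ 1 throughout).
def pvGallop (b M : Int) (hb : 2 ≤ b) (hi : Int) (hhi : 1 ≤ hi) : Int :=
  if b ^ hi.toNat ≤ M then pvGallop b M hb (hi * 2) (by omega) else hi
termination_by (M - hi).toNat
decreasing_by
  rename_i hle
  have h1 : (hi.toNat : Int) < 2 ^ hi.toNat := by
    exact_mod_cast Nat.lt_two_pow_self
  have h2 : (2 : Int) ^ hi.toNat ≤ b ^ hi.toNat := pow_le_pow_left₀ (by omega) hb _
  omega

-- B's binary-search loop: shrink (lo, hi) around the largest e with base ** e ≤ m.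
-- Exponent mid is nonnegative at every call site (0 ≤ lo < mid < hi), so `b ** mid`
-- is exactly b ^ mid.toNat.
def pvBin (b M lo hi : Int) : Int :=
  if h : hi - lo > 1 then
    if b ^ (PySem.Int.floordiv (lo + hi) 2).toNat ≤ M then
      pvBin b M (PySem.Int.floordiv (lo + hi) 2) hi
    else
      pvBin b M lo (PySem.Int.floordiv (lo + hi) 2)
  else lo
termination_by (hi - lo).toNat
decreasing_by
  all_goals
    rw [PySem.Int.floordiv_eq_ediv_of_pos (by omega : (0:Int) < 2)]
    omega

def compute_max_pack_len_by_dlog_alt (base : Int) (max_dlog : Int) : Int :=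
  if max_dlog < 1 then 1
  else if hb : base ≤ 1 then 1
  else
    pvBin base max_dlog 0 (pvGallop base max_dlog (by omega) 1 (by omega)) + 1

-- ===== PRECONDITION & SPEC =====
def Spec_compute_max_pack_len_by_dlog (base : Int) (max_dlog : Int) (out : Int) : Prop := out = compute_max_pack_len_by_dlog_alt base max_dlog
instance (base : Int) (max_dlog : Int) (out : Int) : Decidable (Spec_compute_max_pack_len_by_dlog base max_dlog out) := by unfold Spec_compute_max_pack_len_by_dlog; infer_instance

-- ===== CLAIM =====
def Claim_equal_compute_max_pack_len_by_dlog : Prop := ∀ (base : Int) (max_dlog : Int), Dom_compute_max_pack_len_by_dlog base max_dlog → Spec_compute_max_pack_len_by_dlog base max_dlog (compute_max_pack_len_by_dlog base max_dlog)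

-- ===== LEMMAS AND PROOFS =====

-- A's loop, entered at val = b^j with b^j ≤ M ≤ stuff, counts up to E+1 where
-- b^E ≤ M < b^(E+1).
theorem pvLoopA_eq (b M : Int) (hb : 2 ≤ b) (hM : 1 ≤ M) (E : ℕ)
    (hE1 : b ^ E ≤ M) (hE2 : M < b ^ (E + 1)) :
    ∀ (n j : ℕ) (val count : Int) (hval : 1 ≤ val), n = E - j → j ≤ E → val = b ^ j →
      pvLoopA b M hb val count hval = count + ((E : Int) - (j : Int) + 1) := by
  intro n
  induction n with
  | zero =>
    intro j val count hval hn hj hv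
    have hjE : j = E := by omega
    subst hjE hv
    rw [pvLoopA]
    have hbrk : b ^ j > PySem.Int.floordiv M b := by
      have := (PySem.Int.floordiv_lt_iff_lt_mul (a := M) (b := b) (q := b ^ j) (by omega)).mpr
        (by calc M < b ^ (j + 1) := hE2
                _ = b ^ j * b := by ring)
      omega
    rw [dif_pos hE1, if_pos hbrk]
    push_cast; ring
  | succ n ih =>
    intro j val count hval hn hj hv
    have hjlt : j < E := by omega
    subst hv
    rw [pvLoopA]
    have hle : b ^ j ≤ M := by
      calc b ^ j ≤ b ^ E := pow_le_pow_right₀ (by omega) (by omega)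
        _ ≤ M := hE1
    have hnobrk : ¬ (b ^ j > PySem.Int.floordiv M b) := by
      have hstep : b ^ j * b ≤ M := by
        calc b ^ j * b = b ^ (j + 1) := by ring
          _ ≤ b ^ E := pow_le_pow_right₀ (by omega) (by omega)
          _ ≤ M := hE1
      have := (PySem.Int.le_floordiv_iff_mul_le (a := M) (b := b) (q := b ^ j) (by omega)).mpr hstep
      omega
    rw [dif_pos hle, if_neg hnobrk]
    have := ih (j + 1) (b ^ j * b) (count + 1) (by have h1 : (1:Int) ≤ b ^ j := one_le_pow₀ (by omega); nlinarith)
      (by omega) (by omega) (by ring)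
    rw [this]
    push_cast; ring

-- the gallop loop returns some hi' ≥ hi with M < b^hi'
theorem pvGallop_spec (b M : Int) (hb : 2 ≤ b) :
    ∀ (hi : Int) (hhi : 1 ≤ hi),
      hi ≤ pvGallop b M hb hi hhi ∧ M < b ^ (pvGallop b M hb hi hhi).toNat := by
  intro hi hhi
  induction hi, hhi using pvGallop.induct (b := b) (M := M) (hb := hb) with
  | case1 hi hhi hle ih =>
    rw [pvGallop, if_pos hle]
    exact ⟨by omega, ih.2⟩
  | case2 hi hhi hgt =>
    rw [pvGallop, if_neg hgt]
    exact ⟨le_refl _, by omega⟩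

-- the binary-search loop, given a bracketing 0 ≤ lo < hi with b^lo ≤ M < b^hi,
-- returns r with 0 ≤ r, b^r ≤ M and M < b^(r+1)
theorem pvBin_spec (b M : Int) (hb : 2 ≤ b) :
    ∀ (lo hi : Int), 0 ≤ lo → lo < hi → b ^ lo.toNat ≤ M → M < b ^ hi.toNat →
      0 ≤ pvBin b M lo hi ∧ b ^ (pvBin b M lo hi).toNat ≤ M ∧
        M < b ^ ((pvBin b M lo hi).toNat + 1) := by
  intro lo hi
  induction lo, hi using pvBin.induct (b := b) (M := M) with
  | case1 lo hi hgap hle ih =>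
    intro hlo hlt hl hh
    have hmid : lo < PySem.Int.floordiv (lo + hi) 2 ∧ PySem.Int.floordiv (lo + hi) 2 < hi := by
      rw [PySem.Int.floordiv_eq_ediv_of_pos (by omega : (0:Int) < 2)]
      omega
    rw [pvBin, dif_pos hgap, if_pos hle]
    exact ih (by omega) (by omega) hle hh
  | case2 lo hi hgap hgt ih =>
    intro hlo hlt hl hh
    have hmid : lo < PySem.Int.floordiv (lo + hi) 2 ∧ PySem.Int.floordiv (lo + hi) 2 < hi := by
      rw [PySem.Int.floordiv_eq_ediv_of_pos (by omega : (0:Int) < 2)]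
      omega
    rw [pvBin, dif_pos hgap, if_neg hgt]
    exact ih hlo (by omega) hl (by omega)
  | case3 lo hi hgap =>
    intro hlo hlt hl hh
    rw [pvBin, dif_neg hgap]
    have hhi : hi = lo + 1 := by omega
    have : hi.toNat = lo.toNat + 1 := by omega
    rw [this] at hh
    exact ⟨hlo, hl, hh⟩

-- the bracketing b^e ≤ M < b^(e+1) determines e
theorem pv_bracket_unique (b M : Int) (hb : 2 ≤ b) (e f : ℕ)
    (he1 : b ^ e ≤ M) (he2 : M < b ^ (e + 1))
    (hf1 : b ^ f ≤ M) (hf2 : M < b ^ (f + 1)) : e = f := by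
  by_contra hne
  rcases Nat.lt_or_ge e f with h | h
  · have : b ^ (e + 1) ≤ b ^ f := pow_le_pow_right₀ (by omega) (by omega)
    omega
  · have : b ^ (f + 1) ≤ b ^ e := pow_le_pow_right₀ (by omega) (by omega)
    omega

-- ===== VERDICT =====
theorem compute_max_pack_len_by_dlog_spec : Claim_equal_compute_max_pack_len_by_dlog := by
  intro base max_dlog _
  unfold Spec_compute_max_pack_len_by_dlog compute_max_pack_len_by_dlog compute_max_pack_len_by_dlog_alt
  split
  · rfl
  · split
    · rfl
    · rename_i hM hb
      have hb2 : 2 ≤ base := by omega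
      have hM1 : 1 ≤ max_dlog := by omega
      -- the exponent E with base^E ≤ max_dlog < base^(E+1), via Nat.log
      set E : ℕ := Nat.log base.toNat max_dlog.toNat with hEdef
      have hbn : 1 < base.toNat := by omega
      have hMn : max_dlog.toNat ≠ 0 := by omega
      have hE1 : base ^ E ≤ max_dlog := by
        have := Nat.pow_log_le_self base.toNat hMn
        have h : (base.toNat : Int) ^ E ≤ (max_dlog.toNat : Int) := by exact_mod_cast this
        calc base ^ E = (base.toNat : Int) ^ E := by rw [Int.toNat_of_nonneg (by omega)]
          _ ≤ (max_dlog.toNat : Int) := h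
          _ = max_dlog := Int.toNat_of_nonneg (by omega)
      have hE2 : max_dlog < base ^ (E + 1) := by
        have := Nat.lt_pow_succ_log_self hbn max_dlog.toNat
        have h : (max_dlog.toNat : Int) < (base.toNat : Int) ^ (E + 1) := by exact_mod_cast this
        calc max_dlog = (max_dlog.toNat : Int) := (Int.toNat_of_nonneg (by omega)).symm
          _ < (base.toNat : Int) ^ (E + 1) := h
          _ = base ^ (E + 1) := by rw [Int.toNat_of_nonneg (by omega)]
      -- A's side: loop counts to E + 1
      have hA : pvLoopA base max_dlog (by omega) 1 0 (by omega) = (E : Int) + 1 := by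
        have := pvLoopA_eq base max_dlog (by omega) hM1 E hE1 hE2 E 0 1 0 (by omega)
          (by omega) (by omega) (by rw [pow_zero])
        rw [this]; push_cast; ring
      -- B's side: gallop then binary search hit the same E
      obtain ⟨hge, hgt⟩ := pvGallop_spec base max_dlog hb2 1 (by omega)
      set hiR := pvGallop base max_dlog (by omega) 1 (by omega) with hhiR
      obtain ⟨hr0, hr1, hr2⟩ := pvBin_spec base max_dlog hb2 0 hiR (le_refl 0) (by omega)
        (by simpa using hM1) hgt
      have hEq : (pvBin base max_dlog 0 hiR).toNat = E :=
        pv_bracket_unique base max_dlog hb2 _ E hr1 hr2 hE1 hE2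
      have hBval : pvBin base max_dlog 0 hiR = (E : Int) := by omega
      rw [hA, hBval]
      omega
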